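-- pv_equiv track=rewrite | github.com/seungriyou/algorithm-study | Data-Structure/Array/Baekjoon/BJ-3986_좋은 단어_(V).py | check
-- ===== SOURCE A (Python) =====
-- def check(vocab):
--     """vocab이 좋은 단어인지 판단하는 함수"""
--     stack = []
--     for v in vocab:
--         if stack and stack[-1] == v:
--             stack.pop()
--         else:
--             stack.append(v)
--     return len(stack) == 0
-- ===== SOURCE B (Python) =====
-- def _pass(s):
--     """One left-to-right scan: skip (drop) each adjacent equal pair found."""
--     out = []
--     i = 0
--     while i < len(s):
--         if i + 1 < len(s) and s[i] == s[i + 1]: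
--             i += 2
--         else:
--             out.append(s[i])
--             i += 1
--     return out
--
--
-- def check(vocab):
--     s = list(vocab)
--     t = _pass(s)
--     while t != s:
--         s = t
--         t = _pass(s)
--     return s == []
-- ===== Notes on version B (the rewrite author's own statement) =====
-- stated objective: alternative
-- what changed: Replaces the single stack pass by an iterated scan-and-drop reduction: each pass removes all disjoint adjacent equal pairs it meets, repeated until a fixpoint, then tests emptiness.
import Mathlib
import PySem

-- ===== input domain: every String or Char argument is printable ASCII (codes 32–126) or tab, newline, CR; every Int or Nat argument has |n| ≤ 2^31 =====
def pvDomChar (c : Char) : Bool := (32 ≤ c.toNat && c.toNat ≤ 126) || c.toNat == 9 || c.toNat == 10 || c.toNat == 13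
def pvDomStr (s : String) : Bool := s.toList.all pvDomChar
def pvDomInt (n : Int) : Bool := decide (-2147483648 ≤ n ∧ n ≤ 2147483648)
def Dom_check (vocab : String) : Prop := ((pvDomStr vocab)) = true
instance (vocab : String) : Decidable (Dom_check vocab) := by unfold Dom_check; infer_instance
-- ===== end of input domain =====

-- B replaces the single stack pass by iterated scan-and-drop passes to a fixpoint (alternative decomposition, not faster).

-- ===== PORT A =====
-- the loop body: stack modelled with its top at the HEAD of the list
-- ('stack and stack[-1] == v' → pop, else append)
def checkStep (stack : List Char) (v : Char) : List Char :=
  match stack with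
  | x :: rest => if x = v then rest else v :: x :: rest
  | [] => [v]

def check (vocab : String) : Bool :=
  let stack := vocab.toList.foldl checkStep []
  stack.length == 0

-- ===== PORT B =====
-- one scan of Source B's `_pass`: drop each adjacent equal pair met, keep the rest
def passAux : List Char → List Char
  | [] => []
  | [a] => [a]
  | a :: b :: t => if a = b then passAux t else a :: passAux (b :: t)

theorem passAux_length_le : ∀ l : List Char, (passAux l).length ≤ l.length := by
  intro l
  induction l using passAux.induct with
  | case1 => simp [passAux]
  | case2 a => simp [passAux]
  | case3 b t ih => simp [passAux]; omega
  | case4 a b t hne ih => simp [passAux, hne] at ih ⊢; omega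

theorem passAux_length_lt (l : List Char) (h : passAux l ≠ l) :
    (passAux l).length < l.length := by
  induction l using passAux.induct with
  | case1 => simp [passAux] at h
  | case2 a => simp [passAux] at h
  | case3 b t ih =>
      have := passAux_length_le t
      simp [passAux]; omega
  | case4 a b t hne ih =>
      simp [passAux, hne] at h ⊢
      have := ih h
      simp at this
      omega

-- Source B's `while t != s` loop
def loopB (s : List Char) : List Char :=
  let t := passAux s
  if h : t = s then s else loopB t
termination_by s.length
decreasing_by exact passAux_length_lt s h

def check_alt (vocab : String) : Bool :=
  decide (loopB vocab.toList = [])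

-- ===== PRECONDITION & SPEC =====
def Spec_check (vocab : String) (out : Bool) : Prop := out = check_alt vocab
instance (vocab : String) (out : Bool) : Decidable (Spec_check vocab out) := by unfold Spec_check; infer_instance

-- ===== CLAIM (what is proved, stated in full; the proofs are below) =====
def Claim_equal_check : Prop := ∀ (vocab : String), Dom_check vocab → Spec_check vocab (check vocab)

-- ===== LEMMAS AND PROOFS =====

-- "no adjacent duplicates": stacks produced by A and fixpoints of passAux satisfy it
def Nad (l : List Char) : Prop := List.IsChain (· ≠ ·) l

theorem checkStep_nad {s : List Char} (h : Nad s) (v : Char) : Nad (checkStep s v) := by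
  cases s with
  | nil => simp [checkStep, Nad]
  | cons x rest =>
      by_cases hxv : x = v
      · simpa [checkStep, hxv] using (List.isChain_cons.mp h).2
      · have hch : Nad (v :: x :: rest) :=
          List.isChain_cons_cons.mpr ⟨fun hvx => hxv hvx.symm, h⟩
        simpa [checkStep, hxv, Nad] using hch

-- one pass does not change the stack-machine result (on a Nad stack)
theorem foldl_passAux : ∀ (l s : List Char), Nad s →
    (passAux l).foldl checkStep s = l.foldl checkStep s := by
  intro l
  induction l using passAux.induct with
  | case1 => intro s _; rfl
  | case2 a => intro s _; rfl
  | case3 a t ih =>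
      intro s hs
      have hstep : checkStep (checkStep s a) a = s := by
        cases s with
        | nil => simp [checkStep]
        | cons x rest =>
            by_cases hxa : x = a
            · subst hxa
              cases rest with
              | nil => simp [checkStep]
              | cons y r =>
                  have hxy : x ≠ y := (List.isChain_cons_cons.mp hs).1
                  simp [checkStep, Ne.symm hxy]
            · simp [checkStep, hxa]
      have hp : passAux (a :: a :: t) = passAux t := by simp [passAux]
      rw [hp, ih s hs]
      simp [List.foldl_cons, hstep]
  | case4 a b t hne ih =>
      intro s hs
      simp only [passAux, if_neg hne, List.foldl_cons]
      exact ih (checkStep s a) (checkStep_nad hs a)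

-- a fixpoint of passAux has no adjacent duplicates
theorem passAux_fix_nad : ∀ l : List Char, passAux l = l → Nad l := by
  intro l
  induction l using passAux.induct with
  | case1 => intro _; simp [Nad]
  | case2 a => intro _; simp [Nad]
  | case3 a t ih =>
      intro h
      exfalso
      have := passAux_length_le t
      simp [passAux] at h
      have : (passAux t).length = t.length + 2 := by rw [h]; simp
      omega
  | case4 a b t hne ih =>
      intro h
      simp [passAux, hne] at h
      exact List.isChain_cons_cons.mpr ⟨hne, ih h⟩

-- the stack machine leaves a Nad list intact (reversed onto the stack)
theorem foldl_nad : ∀ (l s : List Char), Nad l →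
    (∀ x t, s = x :: t → ∀ y u, l = y :: u → x ≠ y) →
    l.foldl checkStep s = l.reverse ++ s := by
  intro l
  induction l with
  | nil => intro s _ _; simp
  | cons b t ih =>
      intro s hnad hhead
      have hstep : checkStep s b = b :: s := by
        cases s with
        | nil => simp [checkStep]
        | cons x rest =>
            have hxb : x ≠ b := hhead x rest rfl b t rfl
            simp [checkStep, hxb]
      have hnt : Nad t := (List.isChain_cons.mp hnad).2
      have hht : ∀ x u, b :: s = x :: u → ∀ y v, t = y :: v → x ≠ y := by
        intro x u hx y v ht
        cases hx
        exact (List.isChain_cons.mp hnad).1 y (by rw [ht]; rfl)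
      calc (b :: t).foldl checkStep s = t.foldl checkStep (b :: s) := by
            simp [hstep]
        _ = t.reverse ++ b :: s := ih (b :: s) hnt hht
        _ = (b :: t).reverse ++ s := by simp

theorem loopB_fix : ∀ s : List Char, passAux (loopB s) = loopB s := by
  intro s
  induction s using loopB.induct with
  | case1 s t h => rw [loopB]; rw [dif_pos h]; exact h
  | case2 s t h ih => rw [loopB]; rw [dif_neg h]; exact ih

theorem loopB_foldl : ∀ s : List Char,
    (loopB s).foldl checkStep [] = s.foldl checkStep [] := by
  intro s
  induction s using loopB.induct with
  | case1 s t h => rw [loopB]; rw [dif_pos h]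
  | case2 s t h ih =>
      rw [loopB]; rw [dif_neg h]
      rw [ih]
      exact foldl_passAux s [] (by simp [Nad])

theorem canon_eq_loopB (l : List Char) :
    l.foldl checkStep [] = (loopB l).reverse := by
  have h1 := loopB_foldl l
  have h2 := passAux_fix_nad (loopB l) (loopB_fix l)
  have h3 : (loopB l).foldl checkStep [] = (loopB l).reverse ++ [] :=
    foldl_nad (loopB l) [] h2 (by intro x t hx; simp at hx)
  rw [← h1, h3, List.append_nil]

-- ===== VERDICT (by name: the statement is the Claim_ definition above) =====
theorem check_spec : Claim_equal_check := by
  intro vocab _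
  unfold Spec_check check check_alt
  rw [canon_eq_loopB]
  cases loopB vocab.toList <;> simp
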